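-- pv_equiv track=rewrite | github.com/LazareLive/AutomatedDices | Automated Dice/Dice_Script.py | recursiveDiceNumberSequence
-- ===== SOURCE A (Python) =====
-- import math
--
-- def isEven(n):
--     return ((n % 2) == 0)
--
-- def recursiveDiceNumberSequence(order):
--     #There are several "notable" sequences that we will use for the dice number sequence. They are called triad,
--     #tetrad and pentad. As order cannot be less than 3, we will only use these sequences to generate any dice.
--     #The goal will be to divide the number of faces until we can find a sequence. These sequences are generated by
--     #using various calculations on the classic dices.
--     #Tetrad case - Taken on the D3 and D6 dequences
--     if(order == 3):
--         return [3, 1, 2]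
--     #Tetrad case - Taken on the D8 sequence
--     elif(order == 4):
--         return [4, 1, 3, 2]
--     #Pentad case - Taken on the D10 sequence -- to be checked. This does not feel right
--     elif(order == 5):
--         return [5, 1, 4, 2, 3]
--     #For any other cases : use recursion until we find a n-ad sequence
--     newOrder = math.trunc(order / 2)
--     recursiveSequence = recursiveDiceNumberSequence(newOrder)
--     #As the recursiveSequence will send half of the information, creation of a new array
--     numberSequence = [0] * order
--     if(isEven(order)):
--         #On the case of an even order dice, check witch method to use based on the last recursion sequence
--         for i in range(newOrder):
--                 #Generate the even-numbers on one polar side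
--                 numberSequence[i] = recursiveSequence[i] * 2
--                 #Generate the odd_numbers on the other side
--                 if(isEven(newOrder)):
--                     #On the even-even case, the last sequence is repeated to generate the current order
--                     numberSequence[newOrder + i] = numberSequence[i] - 1
--                 else:
--                     #On the even-odd case, the last sequence must be inverted to have a weak-strong alternance
--                     numberSequence[newOrder + i] = ((newOrder - recursiveSequence[i] + 1) * 2) - 1
--     else:
--         #On the case of an odd dice order, generate the dice following these rules
--         #Placement of the first number
--         numberSequence[0] = order
--         #Placement of the recursive sequence
--         for i in range(newOrder):
--             #Generation of the even numbers on a polar side of the order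
--             numberSequence[i + 1] = recursiveSequence[newOrder - i - 1] * 2
--             #Generation of the odd numbers
--             numberSequence[order - (i + 1)] = order - numberSequence[i + 1]
--     #Return the number sequence at the end
--     return numberSequence
-- ===== SOURCE B (Python) =====
-- def recursiveDiceNumberSequence(order):
--     base = {3: [3, 1, 2], 4: [4, 1, 3, 2], 5: [5, 1, 4, 2, 3]}
--     # collect the chain of orders to expand, halving down to a base case
--     chain = []
--     o = order
--     while o not in base:
--         chain.append(o)
--         o = o // 2
--     seq = base[o]
--     # pop levels and build each sequence functionally from the previous one
--     while chain:
--         o = chain.pop()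
--         h = o // 2
--         if o % 2 == 0:
--             if h % 2 == 0:
--                 tail = [2 * x - 1 for x in seq]
--             else:
--                 tail = [(h - x + 1) * 2 - 1 for x in seq]
--             seq = [2 * x for x in seq] + tail
--         else:
--             seq = [o] + [2 * x for x in reversed(seq)] + [o - 2 * x for x in seq]
--     return seq
-- ===== Notes on version B (the rewrite author's own statement) =====
-- stated objective: alternative
-- what changed: Replaces the recursion with an explicit stack of halved orders and builds each level's sequence functionally with map/reverse/concatenation instead of allocating a zero array and filling it by index assignment.
import Mathlib
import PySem

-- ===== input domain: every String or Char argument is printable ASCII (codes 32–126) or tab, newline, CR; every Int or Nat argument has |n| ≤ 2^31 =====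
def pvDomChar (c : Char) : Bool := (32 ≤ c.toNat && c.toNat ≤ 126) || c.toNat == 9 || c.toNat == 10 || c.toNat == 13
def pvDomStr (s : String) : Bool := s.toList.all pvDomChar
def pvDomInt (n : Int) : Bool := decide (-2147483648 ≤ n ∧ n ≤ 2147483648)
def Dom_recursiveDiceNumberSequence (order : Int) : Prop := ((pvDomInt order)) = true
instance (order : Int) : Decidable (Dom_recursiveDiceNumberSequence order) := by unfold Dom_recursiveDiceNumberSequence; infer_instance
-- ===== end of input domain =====

-- B replaces A's recursion by an explicit stack of halved orders and builds each level
-- functionally with map/reverse/append instead of index-assignment into a zero array (objective: alternative).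

-- ===== PORT A =====
def pvIsEven (n : Int) : Bool := n % 2 == 0

-- fuel = recursion-depth guard only; with fuel = order.toNat it is never exhausted for order ≥ 3
def pvGoA : Nat → Int → List Int
  | 0, _ => []
  | fuel+1, order =>
    if order = 3 then [3, 1, 2]
    else if order = 4 then [4, 1, 3, 2]
    else if order = 5 then [5, 1, 4, 2, 3]
    else
      -- math.trunc(order / 2): truncating division (order/2 is exact in float for |order| ≤ 2^31)
      let newOrder := order.tdiv 2
      let recSeq := pvGoA fuel newOrder
      let ns0 := List.replicate order.toNat (0 : Int)
      if pvIsEven order then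
        (List.range newOrder.toNat).foldl (fun ns i =>
          let ns1 := ns.set i (recSeq.getD i 0 * 2)
          if pvIsEven newOrder then
            ns1.set (newOrder.toNat + i) (ns1.getD i 0 - 1)
          else
            ns1.set (newOrder.toNat + i) ((newOrder - recSeq.getD i 0 + 1) * 2 - 1)) ns0
      else
        let ns1 := ns0.set 0 order
        (List.range newOrder.toNat).foldl (fun ns i =>
          let ns2 := ns.set (i+1) (recSeq.getD (newOrder.toNat - i - 1) 0 * 2)
          ns2.set (order.toNat - (i+1)) (order - ns2.getD (i+1) 0)) ns1

def recursiveDiceNumberSequence (order : Int) : List Int := pvGoA order.toNat order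

-- ===== PORT B =====
-- chain of orders pushed while halving (head = first pushed), plus the final base order
def pvChain : Nat → Int → List Int × Int
  | 0, o => ([], o)
  | fuel+1, o =>
    if o = 3 ∨ o = 4 ∨ o = 5 then ([], o)
    else
      let p := pvChain fuel (PySem.Int.floordiv o 2)
      (o :: p.1, p.2)

def pvBase (b : Int) : List Int :=
  if b = 4 then [4, 1, 3, 2] else if b = 5 then [5, 1, 4, 2, 3] else [3, 1, 2]

def pvExpand (o : Int) (seq : List Int) : List Int :=
  let h := PySem.Int.floordiv o 2
  if o % 2 == 0 then
    let tail := if h % 2 == 0 then seq.map (fun x => 2 * x - 1)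
                else seq.map (fun x => (h - x + 1) * 2 - 1)
    seq.map (fun x => 2 * x) ++ tail
  else
    o :: (seq.reverse.map (fun x => 2 * x) ++ seq.map (fun x => o - 2 * x))

-- popping the stack = foldr over the chain (innermost/last-pushed level expanded first)
def recursiveDiceNumberSequence_alt (order : Int) : List Int :=
  let p := pvChain order.toNat order
  p.1.foldr pvExpand (pvBase p.2)

-- ===== PRECONDITION & SPEC =====
-- Pre_ admits exactly the orders of a real die (at least three faces); below that the Python A recurses forever on trunc(order/2) and dies with RecursionError.
def Pre_recursiveDiceNumberSequence (order : Int) : Prop := 3 ≤ order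
instance (order : Int) : Decidable (Pre_recursiveDiceNumberSequence order) := by
  unfold Pre_recursiveDiceNumberSequence; infer_instance

def pvWitness_recursiveDiceNumberSequence : Int := (6)

def Spec_recursiveDiceNumberSequence (order : Int) (out : List Int) : Prop := out = recursiveDiceNumberSequence_alt order
instance (order : Int) (out : List Int) : Decidable (Spec_recursiveDiceNumberSequence order out) := by unfold Spec_recursiveDiceNumberSequence; infer_instance

-- ===== CLAIM (what is proved, stated in full; the proofs are below) =====
def Claim_equal_recursiveDiceNumberSequence : Prop := ∀ (order : Int), Dom_recursiveDiceNumberSequence order → Pre_recursiveDiceNumberSequence order → Spec_recursiveDiceNumberSequence order (recursiveDiceNumberSequence order)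

-- ===== LEMMAS AND PROOFS =====

theorem floordiv_two (o : Int) : PySem.Int.floordiv o 2 = o / 2 := by
  simp [PySem.Int.floordiv]; rw [Int.fdiv_eq_ediv]; simp

theorem tdiv_two (o : Int) (h : 0 ≤ o) : o.tdiv 2 = o / 2 := by
  rw [Int.tdiv_eq_ediv]; simp [h]

theorem getD_set_int (l : List Int) (i j : Nat) (v : Int) :
    (l.set i v).getD j 0 = if i = j ∧ j < l.length then v else l.getD j 0 := by
  simp [List.getD, List.getElem?_set]
  split_ifs with h1 h2 h3 h4 <;> simp_all

theorem getD_eq_get_int (s : List Int) (i : Nat) (h : i < s.length) : s.getD i 0 = s[i] := by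
  simp [List.getD, List.getElem?_eq_getElem h]

-- pvChain does not depend on the fuel once it is at least o.toNat
theorem pvChain_fuel : ∀ (f1 : Nat) (f2 : Nat) (o : Int), 3 ≤ o → o.toNat ≤ f1 → o.toNat ≤ f2 →
    pvChain f1 o = pvChain f2 o := by
  intro f1
  induction f1 with
  | zero => intro f2 o h3 h1 h2; omega
  | succ f ih =>
    intro f2 o h3 h1 h2
    obtain ⟨g, rfl⟩ : ∃ g, f2 = g + 1 := ⟨f2 - 1, by omega⟩
    by_cases hb : o = 3 ∨ o = 4 ∨ o = 5
    · simp [pvChain, hb]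
    · simp only [pvChain, hb, if_false, floordiv_two]
      rw [ih g (o / 2) (by omega) (by omega) (by omega)]

theorem alt_base : ∀ (o : Int), o = 3 ∨ o = 4 ∨ o = 5 →
    recursiveDiceNumberSequence_alt o = pvBase o := by
  rintro o (rfl|rfl|rfl) <;> simp [recursiveDiceNumberSequence_alt, pvChain]

theorem alt_step (o : Int) (h3 : 3 ≤ o) (hnb : ¬(o = 3 ∨ o = 4 ∨ o = 5)) :
    recursiveDiceNumberSequence_alt o
      = pvExpand o (recursiveDiceNumberSequence_alt (PySem.Int.floordiv o 2)) := by
  have h6 : 6 ≤ o := by omega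
  obtain ⟨g, hg⟩ : ∃ g, o.toNat = g + 1 := ⟨o.toNat - 1, by omega⟩
  unfold recursiveDiceNumberSequence_alt
  rw [hg]
  simp only [pvChain, hnb, if_false, floordiv_two, List.foldr_cons]
  rw [pvChain_fuel g (o/2).toNat (o/2) (by omega) (by omega) (by omega)]

theorem alt_length : ∀ (k : Nat) (o : Int), 3 ≤ o → o.toNat ≤ k →
    (recursiveDiceNumberSequence_alt o).length = o.toNat := by
  intro k
  induction k with
  | zero => intro o h3 h1; omega
  | succ f ih =>
    intro o h3 h1
    by_cases hb : o = 3 ∨ o = 4 ∨ o = 5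
    · rw [alt_base o hb]
      rcases hb with rfl|rfl|rfl <;> simp [pvBase]
    · rw [alt_step o h3 hb, floordiv_two]
      have hrec := ih (o/2) (by omega) (by omega)
      unfold pvExpand
      simp only [floordiv_two]
      by_cases he : o % 2 = 0
      · simp only [he]
        by_cases hh : (o/2) % 2 = 0 <;> simp [hh, hrec] <;> omega
      · have : ¬((o % 2 == 0) = true) := by simpa using he
        simp [this, hrec]
        omega

-- the even-order fill loop of A equals two mapped blocks
theorem fill_even (n : Nat) (s : List Int) (hs : s.length = n) (F G : Int → Int)
    (step : List Int → Nat → List Int)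
    (hstep : ∀ ns i, ns.length = n + n → i < n →
      step ns i = (ns.set i (F (s.getD i 0))).set (n + i) (G (s.getD i 0))) :
    (List.range n).foldl step (List.replicate (n + n) (0 : Int)) = s.map F ++ s.map G := by
  have key : ∀ m, m ≤ n →
      ((List.range m).foldl step (List.replicate (n + n) (0:Int))).length = n + n ∧
      ∀ j, j < n + n → ((List.range m).foldl step (List.replicate (n + n) (0:Int))).getD j 0
        = if j < m then F (s.getD j 0)
          else if j < n then 0
          else if j - n < m then G (s.getD (j - n) 0) else 0 := by
    intro m
    induction m with
    | zero =>
      intro _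
      refine ⟨by simp, ?_⟩
      intro j hj
      simp only [List.range_zero, List.foldl_nil]
      rw [List.getD_eq_getElem _ _ (by simpa using hj), List.getElem_replicate]
      split_ifs <;> omega
    | succ m ih =>
      intro hm
      obtain ⟨ihl, ihv⟩ := ih (by omega)
      rw [List.range_succ, List.foldl_append, List.foldl_cons, List.foldl_nil,
        hstep _ m ihl (by omega)]
      refine ⟨by simp [ihl], ?_⟩
      intro j hj
      rw [getD_set_int, getD_set_int]
      simp only [List.length_set, ihl]
      by_cases h1 : j = n + m
      · rw [if_pos (show n + m = j ∧ j < n + n by omega)]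
        rw [if_neg (by omega), if_neg (by omega), if_pos (by omega)]
        have : j - n = m := by omega
        rw [this]
      · by_cases h2 : j = m
        · rw [if_neg (by omega), if_pos (show m = j ∧ j < n + n by omega)]
          rw [if_pos (by omega), h2]
        · rw [if_neg (by omega), if_neg (by omega), ihv j hj]
          split_ifs <;> first | rfl | omega
  apply List.ext_getElem
  · rw [(key n le_rfl).1]; simp [hs]
  · intro i h1 h2
    have hi : i < n + n := by rw [(key n le_rfl).1] at h1; omega
    have hv := (key n le_rfl).2 i hi
    rw [List.getD_eq_getElem _ _ h1] at hv
    rw [hv]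
    by_cases hc : i < n
    · rw [List.getElem_append_left (by simp [hs]; omega), if_pos hc, List.getElem_map]
      rw [getD_eq_get_int _ _ (by omega)]
    · rw [List.getElem_append_right (by simp [hs]; omega), if_neg hc, if_neg hc,
        if_pos (by omega), List.getElem_map]
      rw [getD_eq_get_int _ _ (by simp [hs]; omega)]
      congr 1
      simp [hs]

-- the odd-order fill loop of A equals the reversed/mapped blocks after the head
theorem fill_odd (n : Nat) (s : List Int) (hs : s.length = n) (o : Int) (F G : Int → Int)
    (step : List Int → Nat → List Int)
    (hstep : ∀ ns i, ns.length = n + n + 1 → i < n →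
      step ns i = (ns.set (i+1) (F (s.getD (n - i - 1) 0))).set (n + n - i) (G (s.getD (n - i - 1) 0))) :
    (List.range n).foldl step ((List.replicate (n + n + 1) (0 : Int)).set 0 o)
      = o :: (s.reverse.map F ++ s.map G) := by
  have key : ∀ m, m ≤ n →
      ((List.range m).foldl step ((List.replicate (n + n + 1) (0:Int)).set 0 o)).length = n + n + 1 ∧
      ∀ j, j < n + n + 1 → ((List.range m).foldl step ((List.replicate (n + n + 1) (0:Int)).set 0 o)).getD j 0
        = if j = 0 then o
          else if j ≤ m then F (s.getD (n - j) 0)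
          else if n + n - m < j then G (s.getD (j - n - 1) 0)
          else 0 := by
    intro m
    induction m with
    | zero =>
      intro _
      refine ⟨by simp, ?_⟩
      intro j hj
      simp only [List.range_zero, List.foldl_nil]
      rw [getD_set_int]
      simp only [List.length_replicate]
      by_cases h0 : j = 0
      · rw [if_pos (by omega), if_pos h0]
      · rw [if_neg (by omega), if_neg h0, if_neg (by omega), if_neg (by omega)]
        rw [List.getD_eq_getElem _ _ (by simpa using hj), List.getElem_replicate]
    | succ m ih =>
      intro hm
      obtain ⟨ihl, ihv⟩ := ih (by omega)
      rw [List.range_succ, List.foldl_append, List.foldl_cons, List.foldl_nil,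
        hstep _ m ihl (by omega)]
      refine ⟨by simp [ihl], ?_⟩
      intro j hj
      rw [getD_set_int, getD_set_int]
      simp only [List.length_set, ihl]
      by_cases h1 : j = n + n - m
      · rw [if_pos (show n + n - m = j ∧ j < n + n + 1 by omega)]
        rw [if_neg (by omega), if_neg (by omega), if_pos (by omega)]
        have : j - n - 1 = n - m - 1 := by omega
        rw [this]
      · by_cases h2 : j = m + 1
        · rw [if_neg (by omega), if_pos (show m + 1 = j ∧ j < n + n + 1 by omega)]
          rw [if_neg (by omega), if_pos (by omega)]
          have : n - j = n - m - 1 := by omega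
          rw [this]
        · rw [if_neg (by omega), if_neg (by omega), ihv j hj]
          split_ifs <;> first | rfl | omega
  apply List.ext_getElem
  · rw [(key n le_rfl).1]; simp [hs]
  · intro i h1 h2
    have hi : i < n + n + 1 := by rw [(key n le_rfl).1] at h1; omega
    have hv := (key n le_rfl).2 i hi
    rw [List.getD_eq_getElem _ _ h1] at hv
    rw [hv]
    rcases Nat.eq_zero_or_pos i with h0 | h0
    · subst h0; simp
    · obtain ⟨k, rfl⟩ : ∃ k, i = k + 1 := ⟨i - 1, by omega⟩
      rw [if_neg (by omega), List.getElem_cons_succ]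
      by_cases hc : k < n
      · rw [List.getElem_append_left (by simp [hs]; omega), if_pos (by omega), List.getElem_map,
          List.getElem_reverse, getD_eq_get_int _ _ (by omega)]
        congr 2
        simp [hs]
        omega
      · rw [List.getElem_append_right (by simp [hs]; omega), if_neg (by omega),
          if_pos (by omega), List.getElem_map, getD_eq_get_int _ _ (by simp [hs]; omega)]
        congr 2
        simp [hs]
        omega

theorem main_lemma : ∀ (fuel : Nat) (o : Int), 3 ≤ o → o.toNat ≤ fuel →
    pvGoA fuel o = recursiveDiceNumberSequence_alt o := by
  intro fuel
  induction fuel with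
  | zero => intro o h3 h1; omega
  | succ f ih =>
    intro o h3 h1
    by_cases hb : o = 3 ∨ o = 4 ∨ o = 5
    · rw [alt_base o hb]
      rcases hb with rfl|rfl|rfl <;> simp [pvGoA, pvBase]
    · have h6 : 6 ≤ o := by omega
      have hne3 : o ≠ 3 := by omega
      have hne4 : o ≠ 4 := by omega
      have hne5 : o ≠ 5 := by omega
      have htd : o.tdiv 2 = o / 2 := tdiv_two o (by omega)
      have hrec : pvGoA f (o / 2) = recursiveDiceNumberSequence_alt (o / 2) :=
        ih (o / 2) (by omega) (by omega)
      have hlen : (recursiveDiceNumberSequence_alt (o / 2)).length = (o / 2).toNat :=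
        alt_length (o / 2).toNat (o / 2) (by omega) le_rfl
      rw [alt_step o h3 hb, floordiv_two]
      simp only [pvGoA, hne3, hne4, hne5, if_false, htd, hrec]
      set s := recursiveDiceNumberSequence_alt (o / 2) with hsdef
      set n := (o / 2).toNat with hndef
      unfold pvExpand
      simp only [floordiv_two]
      by_cases he : o % 2 = 0
      · have heb : pvIsEven o = true := by simp [pvIsEven, he]
        have horder : o.toNat = n + n := by omega
        simp only [heb, if_true, he, beq_self_eq_true, horder]
        by_cases hh : (o / 2) % 2 = 0
        · have hhb : pvIsEven (o / 2) = true := by simp [pvIsEven, hh]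
          simp only [hhb, if_true, hh, beq_self_eq_true]
          exact fill_even n s hlen (fun x => 2 * x) (fun x => 2 * x - 1) _ (by
            intro ns i hlns hi
            simp only []
            rw [getD_set_int, if_pos ⟨rfl, by omega⟩]
            ring_nf)
        · have hhb : pvIsEven (o / 2) = false := by simp [pvIsEven]; omega
          have hhb2 : ¬(((o / 2) % 2 == 0) = true) := by simpa using hh
          simp only [hhb, if_false, if_neg hhb2, Bool.false_eq_true]
          exact fill_even n s hlen (fun x => 2 * x) (fun x => (o / 2 - x + 1) * 2 - 1) _ (by
            intro ns i hlns hi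
            simp only []
            ring_nf)
      · have heb : pvIsEven o = false := by simp [pvIsEven]; omega
        have heb2 : ¬((o % 2 == 0) = true) := by simpa using he
        have horder : o.toNat = n + n + 1 := by omega
        simp only [heb, if_false, if_neg heb2, Bool.false_eq_true, horder]
        exact fill_odd n s hlen o (fun x => 2 * x) (fun x => o - 2 * x) _ (by
          intro ns i hlns hi
          simp only []
          rw [getD_set_int, if_pos ⟨rfl, by omega⟩]
          have : n + n + 1 - (i + 1) = n + n - i := by omega
          rw [this]
          ring_nf)

-- ===== VERDICT (by name: the statement is the Claim_ definition above) =====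
theorem recursiveDiceNumberSequence_spec : Claim_equal_recursiveDiceNumberSequence := by
  intro order _ hpre
  unfold Spec_recursiveDiceNumberSequence recursiveDiceNumberSequence
  exact main_lemma order.toNat order hpre le_rfl
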